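-- pv_equiv track=rewrite | github.com/spencerwuwu/py-conbyte | test/loop.py | loop
-- ===== SOURCE A (Python) =====
-- def loop(a, b):
--     arr = [a, a, b, a, a, a]
--     cnt = 0
--     for ele in arr:
--         if ele > 1:
--             break
--         cnt += ele
--     return cnt
-- ===== SOURCE B (Python) =====
-- def loop(a, b):
--     if a > 1:
--         return 0
--     if b > 1:
--         return a + a
--     return a * 5 + b
-- ===== Notes on version B (the rewrite author's own statement) =====
-- stated objective: simpler
-- what changed: Replaced the array-and-break loop by three explicit branches with a closed-form sum (a*5+b) for the no-break case.
import Mathlib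
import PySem

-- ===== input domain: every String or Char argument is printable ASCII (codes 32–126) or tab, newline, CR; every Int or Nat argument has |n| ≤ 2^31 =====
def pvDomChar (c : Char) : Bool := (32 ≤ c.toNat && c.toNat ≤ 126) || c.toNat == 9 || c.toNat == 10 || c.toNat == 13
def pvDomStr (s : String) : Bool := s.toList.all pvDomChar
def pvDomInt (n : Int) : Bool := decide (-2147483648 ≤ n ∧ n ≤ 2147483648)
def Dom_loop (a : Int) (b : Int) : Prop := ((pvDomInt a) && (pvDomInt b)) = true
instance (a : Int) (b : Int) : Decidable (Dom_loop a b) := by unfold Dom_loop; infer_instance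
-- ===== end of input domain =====

-- B replaces the array-and-break loop by explicit branches with a closed-form sum (simpler).

-- ===== PORT A =====
-- the for-loop with break, as structural recursion over the list with the running cnt
def loopGo : List Int → Int → Int
  | [], cnt => cnt
  | e :: rest, cnt => if e > 1 then cnt else loopGo rest (cnt + e)

def loop (a : Int) (b : Int) : Int := loopGo [a, a, b, a, a, a] 0

-- ===== PORT B =====
def loop_alt (a : Int) (b : Int) : Int :=
  if a > 1 then 0 else if b > 1 then a + a else a * 5 + b

-- ===== PRECONDITION & SPEC =====
def Spec_loop (a : Int) (b : Int) (out : Int) : Prop := out = loop_alt a b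
instance (a : Int) (b : Int) (out : Int) : Decidable (Spec_loop a b out) := by unfold Spec_loop; infer_instance

-- ===== CLAIM (what is proved, stated in full; the proofs are below) =====
def Claim_equal_loop : Prop := ∀ (a : Int) (b : Int), Dom_loop a b → Spec_loop a b (loop a b)

-- ===== LEMMAS AND PROOFS =====

-- ===== VERDICT (by name: the statement is the Claim_ definition above) =====
theorem loop_spec : Claim_equal_loop := by
  intro a b _
  unfold Spec_loop loop loop_alt
  simp only [loopGo]
  split_ifs <;> ring
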